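-- pv_equiv track=rewrite | github.com/agilenature/orchestrator-policy-extraction | src/pipeline/utils.py | scopes_overlap
-- ===== SOURCE A (Python) =====
-- def scopes_overlap(paths_a: list[str], paths_b: list[str]) -> bool:
--     """Check if two sets of scope paths overlap using bidirectional prefix matching.
--
--     An empty paths list means repo-wide scope (matches everything).
--     This differs from validation/layers.py _scopes_overlap() which only
--     treats the constraint side as repo-wide when empty (episode paths empty
--     means no scope info, not repo-wide).
--
--     Args:
--         paths_a: First set of scope paths (e.g., constraint paths).
--         paths_b: Second set of scope paths (e.g., session paths).
--
--     Returns: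
--         True if the scopes overlap, False otherwise.
--     """
--     if not paths_a or not paths_b:
--         return True
--
--     for a in paths_a:
--         for b in paths_b:
--             if a.startswith(b) or b.startswith(a):
--                 return True
--
--     return False
-- ===== SOURCE B (Python) =====
-- def scopes_overlap(paths_a: list[str], paths_b: list[str]) -> bool:
--     """Hash-set re-implementation: index paths_b once (exact values and all
--     their prefixes), then test each a by membership lookups instead of
--     scanning paths_b."""
--     if not paths_a or not paths_b:
--         return True
--
--     b_exact = set(paths_b)
--     b_prefixes = {b[:i] for b in paths_b for i in range(len(b) + 1)}
--
--     for a in paths_a: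
--         if a in b_prefixes:  # a is a prefix of some b (or equal)
--             return True
--         if any(a[:i] in b_exact for i in range(len(a) + 1)):  # some b is a prefix of a
--             return True
--     return False
-- ===== Notes on version B (the rewrite author's own statement) =====
-- stated objective: alternative
-- what changed: Replaced the nested scan over paths_b with a set index of paths_b and of all its prefixes built once, so each a is tested by per-prefix membership lookups instead of a pass over paths_b; it trades A's early exit for the upfront index.
import Mathlib
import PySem

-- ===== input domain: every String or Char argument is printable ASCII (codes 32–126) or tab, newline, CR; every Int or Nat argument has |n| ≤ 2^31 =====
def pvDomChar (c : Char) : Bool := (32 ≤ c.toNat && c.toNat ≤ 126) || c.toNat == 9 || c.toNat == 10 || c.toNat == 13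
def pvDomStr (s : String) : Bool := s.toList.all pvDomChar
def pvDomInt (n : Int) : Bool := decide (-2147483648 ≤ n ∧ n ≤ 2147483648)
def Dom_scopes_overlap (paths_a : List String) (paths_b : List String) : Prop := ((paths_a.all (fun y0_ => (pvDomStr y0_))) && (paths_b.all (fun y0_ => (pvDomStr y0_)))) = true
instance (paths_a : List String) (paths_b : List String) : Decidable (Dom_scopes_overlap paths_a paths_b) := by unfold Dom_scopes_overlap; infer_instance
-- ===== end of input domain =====

-- B replaces A's nested scan of paths_b by a set index of paths_b and of all its
-- prefixes, built once and queried by membership for each a (objective: alternative algorithm, same result).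

-- ===== PORT A =====
def scopes_overlap (paths_a : List String) (paths_b : List String) : Bool :=
  if paths_a.isEmpty || paths_b.isEmpty then true
  else
    paths_a.any (fun a =>
      paths_b.any (fun b =>
        PySem.Str.startswith a b || PySem.Str.startswith b a))

-- ===== PORT B =====
-- {b[:i] for b in paths_b for i in range(len(b)+1)} ; b[:i] with 0 ≤ i is List.take i on the chars
def pvBPrefixes (paths_b : List String) : PySem.Set String :=
  PySem.Set.ofList (paths_b.flatMap (fun b =>
    (List.range (b.toList.length + 1)).map (fun i => String.ofList (b.toList.take i))))

def scopes_overlap_alt (paths_a : List String) (paths_b : List String) : Bool :=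
  if paths_a.isEmpty || paths_b.isEmpty then true
  else
    let bExact : PySem.Set String := PySem.Set.ofList paths_b
    let bPrefixes : PySem.Set String := pvBPrefixes paths_b
    paths_a.any (fun a =>
      PySem.Set.contains bPrefixes a ||
      (List.range (a.toList.length + 1)).any (fun i =>
        PySem.Set.contains bExact (String.ofList (a.toList.take i))))

-- ===== PRECONDITION & SPEC =====
def Spec_scopes_overlap (paths_a : List String) (paths_b : List String) (out : Bool) : Prop := out = scopes_overlap_alt paths_a paths_b
instance (paths_a : List String) (paths_b : List String) (out : Bool) : Decidable (Spec_scopes_overlap paths_a paths_b out) := by unfold Spec_scopes_overlap; infer_instance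

-- ===== CLAIM (what is proved, stated in full; the proofs are below) =====
def Claim_equal_scopes_overlap : Prop := ∀ (paths_a : List String) (paths_b : List String), Dom_scopes_overlap paths_a paths_b → Spec_scopes_overlap paths_a paths_b (scopes_overlap paths_a paths_b)

-- ===== LEMMAS AND PROOFS =====

-- a string s is a prefix of t (on chars) iff s is one of the takes t[:i], i ≤ len t
theorem pv_take_iff_prefix (s t : String) :
    (∃ i, i < t.toList.length + 1 ∧ String.ofList (t.toList.take i) = s) ↔ s.toList <+: t.toList := by
  constructor
  · rintro ⟨i, _, rfl⟩
    simpa using List.take_prefix i t.toList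
  · intro h
    refine ⟨s.toList.length, by have := h.length_le; omega, ?_⟩
    rw [← List.prefix_iff_eq_take.mp h]
    simp

theorem scopes_overlap_eq (paths_a paths_b : List String) :
    scopes_overlap paths_a paths_b = scopes_overlap_alt paths_a paths_b := by
  unfold scopes_overlap scopes_overlap_alt
  split
  · rfl
  · rw [Bool.eq_iff_iff]
    simp only [List.any_eq_true, Bool.or_eq_true, PySem.Str.startswith_eq,
      PySem.Chars.startswith_iff, PySem.Set.contains_iff, PySem.Set.mem_ofList,
      pvBPrefixes, List.mem_flatMap, List.mem_map, List.mem_range]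
    constructor
    · rintro ⟨a, ha, b, hb, h | h⟩
      · obtain ⟨i, hi, heq⟩ := (pv_take_iff_prefix b a).mpr h
        exact ⟨a, ha, Or.inr ⟨i, hi, heq ▸ hb⟩⟩
      · exact ⟨a, ha, Or.inl ⟨b, hb, (pv_take_iff_prefix a b).mpr h⟩⟩
    · rintro ⟨a, ha, ⟨b, hb, i, hi, heq⟩ | ⟨i, hi, hmem⟩⟩
      · exact ⟨a, ha, b, hb, Or.inr ((pv_take_iff_prefix a b).mp ⟨i, hi, heq⟩)⟩
      · exact ⟨a, ha, _, hmem, Or.inl ((pv_take_iff_prefix _ a).mp ⟨i, hi, rfl⟩)⟩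

-- ===== VERDICT (by name: the statement is the Claim_ definition above) =====
theorem scopes_overlap_spec : Claim_equal_scopes_overlap := by
  intro paths_a paths_b _
  exact scopes_overlap_eq paths_a paths_b
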